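-- pv_equiv track=rewrite | github.com/crvlwanek/music_theory_project | key.py | get_accidentals
-- ===== SOURCE A (Python) =====
-- def circle_fifth(step):
--     step += 4
--     if step > 6:
--         step = step % 7
--     return step
--
-- def circle_fourth(step):
--     step += 3
--     if step > 6:
--         step = step % 7
--     return step
--
-- def get_accidentals(total_accidentals, adjust_accidental, scale_len):
--     accidentals = [0] * scale_len
--     if total_accidentals == 0:
--         return accidentals
--     if total_accidentals > 0:
--         step = 3
--     if total_accidentals < 0:
--         step = 2
--         for i in range(abs(total_accidentals)):
--             step = circle_fourth(step)
--     for i in range(abs(total_accidentals)):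
--         if total_accidentals > 0:
--             step = circle_fourth(step)
--         if total_accidentals < 0:
--             step = circle_fifth(step)
--         accidentals[step] += adjust_accidental
--     return accidentals
-- ===== SOURCE B (Python) =====
-- def get_accidentals(total_accidentals, adjust_accidental, scale_len):
--     # closed form: each circle index receives quotient-many accidentals, plus one
--     # more if it is among the first (remainder) entries of the fixed hit order
--     accidentals = [0] * scale_len
--     n = abs(total_accidentals)
--     if n == 0:
--         return accidentals
--     order = [6, 2, 5, 1, 4, 0, 3] if total_accidentals > 0 else [2, 5, 1, 4, 0, 3, 6]
--     q, r = divmod(n, 7)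
--     for pos, idx in enumerate(order):
--         c = q + (1 if pos < r else 0)
--         if c:
--             accidentals[idx] += adjust_accidental * c
--     return accidentals
-- ===== Notes on version B (the rewrite author's own statement) =====
-- stated objective: faster
-- what changed: A walks the circle of fifths/fourths step by step, once per accidental (|total_accidentals| loop iterations); B computes each circle index's hit count in closed form via divmod(|total|, 7) plus the fixed 7-entry hit order, filling the [0]*scale_len array in a single 7-step loop.
import Mathlib
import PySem

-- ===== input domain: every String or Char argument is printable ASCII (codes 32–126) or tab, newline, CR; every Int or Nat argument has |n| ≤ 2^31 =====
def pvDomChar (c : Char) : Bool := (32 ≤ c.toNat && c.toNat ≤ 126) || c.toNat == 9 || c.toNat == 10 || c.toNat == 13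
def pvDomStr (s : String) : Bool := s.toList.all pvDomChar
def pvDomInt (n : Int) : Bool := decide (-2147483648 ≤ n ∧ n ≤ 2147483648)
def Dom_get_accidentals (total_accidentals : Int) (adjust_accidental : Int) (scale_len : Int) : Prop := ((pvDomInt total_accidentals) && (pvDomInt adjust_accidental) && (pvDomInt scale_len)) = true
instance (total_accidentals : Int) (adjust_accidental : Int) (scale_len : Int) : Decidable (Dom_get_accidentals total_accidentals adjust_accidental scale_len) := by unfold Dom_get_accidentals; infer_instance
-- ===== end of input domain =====

-- B replaces A's O(|total_accidentals|) circle-of-fifths walk by a closed form: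
-- each circle index is hit quotient-many times plus once if it is among the first
-- (remainder) entries of the fixed 7-step hit order.


-- ===== PORT A =====
def pv_circle_fifth (step : Int) : Int :=
  let s := step + 4
  if s > 6 then PySem.Int.mod s 7 else s

def pv_circle_fourth (step : Int) : Int :=
  let s := step + 3
  if s > 6 then PySem.Int.mod s 7 else s

-- Python 'xs[i] += v': exact whenever 0 ≤ i < len xs (guaranteed by Pre_; Python raises otherwise)
def pv_setAdd (xs : List Int) (i : Int) (v : Int) : List Int :=
  xs.set i.toNat (xs.getD i.toNat 0 + v)

def get_accidentals (total_accidentals : Int) (adjust_accidental : Int) (scale_len : Int) : List Int :=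
  let accidentals : List Int := List.replicate scale_len.toNat 0   -- [0] * scale_len ([] for scale_len ≤ 0)
  if total_accidentals = 0 then accidentals
  else
    -- range(abs(total_accidentals)) ported as List.range total_accidentals.natAbs
    let step : Int :=
      if total_accidentals < 0 then
        (List.range total_accidentals.natAbs).foldl (fun s _ => pv_circle_fourth s) 2
      else 3
    ((List.range total_accidentals.natAbs).foldl
      (fun (p : List Int × Int) (_ : Nat) =>
        let s' := if total_accidentals > 0 then pv_circle_fourth p.2 else pv_circle_fifth p.2
        (pv_setAdd p.1 s' adjust_accidental, s'))
      (accidentals, step)).1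

-- ===== PORT B =====
def get_accidentals_alt (total_accidentals : Int) (adjust_accidental : Int) (scale_len : Int) : List Int :=
  let accidentals : List Int := List.replicate scale_len.toNat 0   -- [0] * scale_len
  let n : Nat := total_accidentals.natAbs                          -- abs(total_accidentals)
  if n = 0 then accidentals
  else
    let order : List Int := if total_accidentals > 0 then [6, 2, 5, 1, 4, 0, 3] else [2, 5, 1, 4, 0, 3, 6]
    let q : Nat := n / 7                                           -- divmod(n, 7): n ≥ 0, divisor 7 > 0, Nat div/mod exact
    let r : Nat := n % 7
    (PySem.List.enumerate order).foldl
      (fun acc pi =>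
        let c : Int := (q : Int) + (if pi.1 < (r : Int) then 1 else 0)
        if c ≠ 0 then pv_setAdd acc pi.2 (adjust_accidental * c) else acc)   -- 'if c: accidentals[idx] += adjust * c'
      accidentals

-- ===== PRECONDITION & SPEC =====
-- Pre_ is exactly where Python A returns: otherwise 'accidentals[step] += …' raises IndexError
-- (the first circle index reached is ≥ scale_len).
def Pre_get_accidentals (total_accidentals : Int) (adjust_accidental : Int) (scale_len : Int) : Prop :=
  total_accidentals = 0 ∨
  (0 < total_accidentals ∧ 7 ≤ scale_len) ∨
  (total_accidentals < 0 ∧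
    ((total_accidentals = -1 ∧ 3 ≤ scale_len) ∨
     (-6 ≤ total_accidentals ∧ total_accidentals ≤ -2 ∧ 6 ≤ scale_len) ∨
     (total_accidentals ≤ -7 ∧ 7 ≤ scale_len)))
instance (total_accidentals : Int) (adjust_accidental : Int) (scale_len : Int) : Decidable (Pre_get_accidentals total_accidentals adjust_accidental scale_len) := by unfold Pre_get_accidentals; infer_instance

def pvWitness_get_accidentals : Int × Int × Int := (7, 1, 7)

def Spec_get_accidentals (total_accidentals : Int) (adjust_accidental : Int) (scale_len : Int) (out : List Int) : Prop := out = get_accidentals_alt total_accidentals adjust_accidental scale_len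
instance (total_accidentals : Int) (adjust_accidental : Int) (scale_len : Int) (out : List Int) : Decidable (Spec_get_accidentals total_accidentals adjust_accidental scale_len out) := by unfold Spec_get_accidentals; infer_instance

-- ===== CLAIM (what is proved, stated in full; the proofs are below) =====
def Claim_equal_get_accidentals : Prop := ∀ (total_accidentals : Int) (adjust_accidental : Int) (scale_len : Int), Dom_get_accidentals total_accidentals adjust_accidental scale_len → Pre_get_accidentals total_accidentals adjust_accidental scale_len → Spec_get_accidentals total_accidentals adjust_accidental scale_len (get_accidentals total_accidentals adjust_accidental scale_len)

-- ===== LEMMAS AND PROOFS =====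

-- closed forms of the two circle walks on [0, 7)
lemma circle_fourth_eq (s : Int) (h : 0 ≤ s ∧ s < 7) : pv_circle_fourth s = (s + 3) % 7 := by
  simp only [pv_circle_fourth, PySem.Int.mod_eq_emod_of_pos (by omega : (0:Int) < 7)]
  split_ifs <;> omega

lemma circle_fifth_eq (s : Int) (h : 0 ≤ s ∧ s < 7) : pv_circle_fifth s = (s + 4) % 7 := by
  simp only [pv_circle_fifth, PySem.Int.mod_eq_emod_of_pos (by omega : (0:Int) < 7)]
  split_ifs <;> omega

lemma cf4_iter (k : Nat) (s : Int) (h : 0 ≤ s ∧ s < 7) :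
    pv_circle_fourth^[k] s = (s + 3 * k) % 7 := by
  induction k with
  | zero => simp; omega
  | succ k ih =>
      rw [Function.iterate_succ_apply', ih,
        circle_fourth_eq _ (by constructor <;> omega)]
      push_cast
      omega

lemma cf5_iter (k : Nat) (s : Int) (h : 0 ≤ s ∧ s < 7) :
    pv_circle_fifth^[k] s = (s + 4 * k) % 7 := by
  induction k with
  | zero => simp; omega
  | succ k ih =>
      rw [Function.iterate_succ_apply', ih,
        circle_fifth_eq _ (by constructor <;> omega)]
      push_cast
      omega

lemma preloop_eq (n : Nat) (s : Int) :
    (List.range n).foldl (fun s _ => pv_circle_fourth s) s = pv_circle_fourth^[n] s := by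
  induction n with
  | zero => rfl
  | succ n ih => rw [List.range_succ, List.foldl_append, ih, Function.iterate_succ_apply']; rfl

-- the main loop in terms of the list of hit indices
lemma loop_fold (g : Int → Int) (a : Int) (n : Nat) (acc : List Int) (s : Int) :
    (List.range n).foldl (fun (p : List Int × Int) (_ : Nat) => (pv_setAdd p.1 (g p.2) a, g p.2)) (acc, s)
    = (((List.range n).map (fun k => g^[k+1] s)).foldl (fun l i => pv_setAdd l i a) acc, g^[n] s) := by
  induction n with
  | zero => rfl
  | succ n ih =>
      rw [List.range_succ, List.foldl_append, List.map_append, List.foldl_append, ih,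
        Function.iterate_succ_apply']
      simp only [List.map_cons, List.map_nil, List.foldl_cons, List.foldl_nil,
        Function.iterate_succ_apply']

lemma length_setAdd (xs : List Int) (i v : Int) : (pv_setAdd xs i v).length = xs.length := by
  simp [pv_setAdd]

lemma length_foldl_setAdd (a : Int) (hs : List Int) (acc : List Int) :
    (hs.foldl (fun l i => pv_setAdd l i a) acc).length = acc.length := by
  induction hs generalizing acc with
  | nil => rfl
  | cons x tl ih => simp [List.foldl_cons, ih, length_setAdd]

lemma getD_foldl_setAdd (a : Int) (hs : List Int) (acc : List Int) (i : Nat)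
    (hh : ∀ x ∈ hs, 0 ≤ x ∧ x.toNat < acc.length) :
    (hs.foldl (fun l i => pv_setAdd l i a) acc).getD i 0
      = acc.getD i 0 + a * hs.count (i : Int) := by
  induction hs generalizing acc with
  | nil => simp
  | cons x tl ih =>
      have hx := hh x (by simp)
      rw [List.foldl_cons, ih _ (by intro y hy; simpa [length_setAdd] using hh y (by simp [hy]))]
      have hcnt : (x :: tl).count (i : Int) = tl.count (i : Int) + if x = (i : Int) then 1 else 0 := by
        simp [List.count_cons]
      rw [hcnt]
      have hget : (pv_setAdd acc x a).getD i 0 = acc.getD i 0 + if x = (i : Int) then a else 0 := by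
        unfold pv_setAdd
        by_cases hxi : x = (i : Int)
        · have hti : x.toNat = i := by omega
          rw [← hti, if_pos (by omega : x = (x.toNat : Int))]
          simp [List.getD_eq_getElem?_getD, hx.2]
        · have hti : x.toNat ≠ i := by omega
          simp [hxi, List.getD_eq_getElem?_getD, List.getElem?_set_ne hti]
      rw [hget]
      split_ifs <;> push_cast <;> ring

-- counting one residue class mod 7 inside range n
lemma countP_mod7 (n c : Nat) (hc : c < 7) :
    (List.range n).countP (fun k => k % 7 = c) = n / 7 + (if c < n % 7 then 1 else 0) := by
  induction n with
  | zero => simp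
  | succ n ih =>
      rw [List.range_succ, List.countP_append, ih]
      simp only [List.countP_cons, List.countP_nil, decide_eq_true_eq]
      split_ifs <;> omega

-- count of index i among the hit list, when hitting k-th index = i is one residue class mod 7
lemma count_hits (n : Nat) (f : Nat → Int) (i : Nat) (c : Nat) (hc : c < 7)
    (hpt : ∀ k < n, (f k = (i : Int)) ↔ k % 7 = c) :
    ((List.range n).map f).count (i : Int) = n / 7 + (if c < n % 7 then 1 else 0) := by
  have h1 : ((List.range n).map f).count (i : Int) = (List.range n).countP (fun k => f k == (i : Int)) := by
    simp [List.count_eq_countP, List.countP_map]; rfl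
  have h2 : (List.range n).countP (fun k => f k == (i : Int)) = (List.range n).countP (fun k => k % 7 = c) := by
    apply List.countP_congr
    intro k hk
    simp only [List.mem_range] at hk
    rw [Bool.eq_iff_iff]
    simp [hpt k hk]
  rw [h1, h2, countP_mod7 n c hc]

-- one conditional 'accidentals[idx] += aj*c' step of B, length and value
lemma length_condSetAdd (b : Prop) [Decidable b] (acc : List Int) (k w : Int) :
    (if b then pv_setAdd acc k w else acc).length = acc.length := by
  split_ifs <;> simp [pv_setAdd]

lemma getD_condSetAdd (acc : List Int) (k c aj : Int) (i : Nat)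
    (hb : c ≠ 0 → 0 ≤ k ∧ k.toNat < acc.length) :
    (if c ≠ 0 then pv_setAdd acc k (aj * c) else acc).getD i 0
      = acc.getD i 0 + (if k = (i : Int) then aj * c else 0) := by
  by_cases hc : c = 0
  · simp [hc]
  · rw [if_pos hc]
    obtain ⟨hk0, hkl⟩ := hb hc
    unfold pv_setAdd
    by_cases hk : k = (i : Int)
    · have hti : k.toNat = i := by omega
      rw [← hti, if_pos (by omega : k = (k.toNat : Int))]
      simp [List.getD_eq_getElem?_getD, hkl]
    · have hti : k.toNat ≠ i := by omega
      simp [hk, List.getD_eq_getElem?_getD, List.getElem?_set_ne hti]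

-- B's whole loop: each index collects the contribution of the pairs keyed to it
lemma getD_foldl_cond (aj : Int) (f : Int × Int → Int) (l : List (Int × Int)) (acc : List Int) (i : Nat)
    (hb : ∀ p ∈ l, f p ≠ 0 → 0 ≤ p.2 ∧ p.2.toNat < acc.length) :
    (l.foldl (fun acc2 p => if f p ≠ 0 then pv_setAdd acc2 p.2 (aj * f p) else acc2) acc).getD i 0
      = acc.getD i 0 + (l.map (fun p => if p.2 = (i : Int) then aj * f p else 0)).sum := by
  induction l generalizing acc with
  | nil => simp
  | cons p tl ih =>
      simp only [List.foldl_cons, List.map_cons, List.sum_cons]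
      rw [ih _ (fun p' hp' hf => by
        have h := hb p' (by simp [hp']) hf
        exact ⟨h.1, by rw [length_condSetAdd]; exact h.2⟩)]
      rw [getD_condSetAdd acc p.2 (f p) aj i (hb p (by simp))]
      ring

lemma length_foldl_cond (aj : Int) (f : Int × Int → Int) (l : List (Int × Int)) (acc : List Int) :
    (l.foldl (fun acc2 p => if f p ≠ 0 then pv_setAdd acc2 p.2 (aj * f p) else acc2) acc).length
      = acc.length := by
  induction l generalizing acc with
  | nil => rfl
  | cons p tl ih => rw [List.foldl_cons, ih, length_condSetAdd]

theorem get_accidentals_spec : Claim_equal_get_accidentals := by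
  intro t a L hD hp
  unfold Spec_get_accidentals get_accidentals get_accidentals_alt
  by_cases h0 : t = 0
  · subst h0
    norm_num
  · have hnz : ¬ t.natAbs = 0 := by omega
    rcases hp with h | ⟨ht, hL⟩ | ⟨htl, hsub⟩
    · exact absurd h h0
    · -- total_accidentals > 0
      have hgt : t > 0 := ht
      have hngt : ¬ t < 0 := by omega
      simp only [if_neg h0, if_pos hgt, if_neg hngt, if_neg hnz]
      rw [loop_fold]
      dsimp only
      have hmap : (List.range t.natAbs).map (fun k => pv_circle_fourth^[k+1] 3)
          = (List.range t.natAbs).map (fun (k : Nat) => ((3:Int) + 3*((k:Int)+1)) % 7) := by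
        apply List.map_congr_left
        intro k _
        rw [cf4_iter (k+1) 3 (by norm_num)]
        push_cast
        ring_nf
      rw [hmap]
      have hh : ∀ x ∈ (List.range t.natAbs).map (fun (k : Nat) => ((3:Int) + 3*((k:Int)+1)) % 7),
          0 ≤ x ∧ x.toNat < (List.replicate L.toNat (0:Int)).length := by
        intro x hx
        simp only [List.mem_map, List.mem_range] at hx
        obtain ⟨k, hk, rfl⟩ := hx
        simp only [List.length_replicate]
        omega
      have hb : ∀ p ∈ PySem.List.enumerate [(6:Int), 2, 5, 1, 4, 0, 3],
          (((t.natAbs / 7 : Nat) : Int) + (if p.1 < ((t.natAbs % 7 : Nat) : Int) then 1 else 0)) ≠ 0 →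
          0 ≤ p.2 ∧ p.2.toNat < (List.replicate L.toNat (0:Int)).length := by
        intro p hp hf
        simp only [List.length_replicate]
        fin_cases hp <;> split_ifs at hf <;> exact ⟨by norm_num, by omega⟩
      apply List.ext_getElem
      · rw [length_foldl_setAdd, length_foldl_cond]
      · intro i h1 h2
        rw [← List.getD_eq_getElem _ 0, getD_foldl_setAdd a _ _ i hh]
        rw [← List.getD_eq_getElem _ 0,
          getD_foldl_cond a (fun p => ((t.natAbs / 7 : Nat) : Int) + (if p.1 < ((t.natAbs % 7 : Nat) : Int) then 1 else 0)) _ _ i hb]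
        have hiL : i < L.toNat := by
          have := h1
          rw [length_foldl_setAdd] at this
          simpa using this
        have hrep : (List.replicate L.toNat (0:Int)).getD i 0 = 0 := by
          simp [List.getD_eq_getElem?_getD, hiL]
        rw [hrep, zero_add, zero_add]
        by_cases hi : i < 7
        · rw [count_hits t.natAbs _ i ((5*i+5) % 7) (Nat.mod_lt _ (by norm_num))
            (by intro k hk; omega)]
          interval_cases i <;>
            · simp only [PySem.List.enumerate_cons, PySem.List.enumerate_nil, List.map_cons,
                List.map_nil, List.sum_cons, List.sum_nil]
              norm_num
              congr 1
              push_cast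
              simp only [Int.abs_eq_natAbs]
              split_ifs <;> omega
        · have hc0 : ((List.range t.natAbs).map (fun (k : Nat) => ((3:Int) + 3*((k:Int)+1)) % 7)).count (i : Int) = 0 := by
            rw [List.count_eq_zero]
            intro hmem
            simp only [List.mem_map, List.mem_range] at hmem
            obtain ⟨k, _, hk⟩ := hmem
            omega
          rw [hc0]
          have h3 : ¬((6:Int) = (i : Int)) := by omega
          have h4 : ¬((2:Int) = (i : Int)) := by omega
          have h5 : ¬((5:Int) = (i : Int)) := by omega
          have h6 : ¬((1:Int) = (i : Int)) := by omega
          have h7 : ¬((4:Int) = (i : Int)) := by omega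
          have h8 : ¬((0:Int) = (i : Int)) := by omega
          have h9 : ¬((3:Int) = (i : Int)) := by omega
          simp only [PySem.List.enumerate_cons, PySem.List.enumerate_nil, List.map_cons,
            List.map_nil, List.sum_cons, List.sum_nil,
            if_neg h3, if_neg h4, if_neg h5, if_neg h6, if_neg h7, if_neg h8, if_neg h9]
          simp
    · -- total_accidentals < 0
      have hngt : ¬ t > 0 := by omega
      simp only [if_neg h0, if_pos htl, if_neg hngt, if_neg hnz]
      rw [preloop_eq, cf4_iter _ 2 (by norm_num), loop_fold]
      dsimp only
      have hmap : (List.range t.natAbs).map (fun k => pv_circle_fifth^[k+1] (((2:Int) + 3*(t.natAbs:Int)) % 7))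
          = (List.range t.natAbs).map (fun (k : Nat) => (((2:Int) + 3*(t.natAbs:Int)) % 7 + 4*((k:Int)+1)) % 7) := by
        apply List.map_congr_left
        intro k _
        rw [cf5_iter (k+1) _ ⟨Int.emod_nonneg _ (by norm_num), Int.emod_lt_of_pos _ (by norm_num)⟩]
        push_cast
        ring_nf
      rw [hmap]
      rcases hsub with ⟨ht1, hL3⟩ | ⟨ht2, ht3, hL6⟩ | ⟨ht4, hL7⟩ <;>
      · have hh : ∀ x ∈ (List.range t.natAbs).map (fun (k : Nat) => (((2:Int) + 3*(t.natAbs:Int)) % 7 + 4*((k:Int)+1)) % 7),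
            0 ≤ x ∧ x.toNat < (List.replicate L.toNat (0:Int)).length := by
          intro x hx
          simp only [List.mem_map, List.mem_range] at hx
          obtain ⟨k, hk, rfl⟩ := hx
          simp only [List.length_replicate]
          omega
        have hb : ∀ p ∈ PySem.List.enumerate [(2:Int), 5, 1, 4, 0, 3, 6],
            (((t.natAbs / 7 : Nat) : Int) + (if p.1 < ((t.natAbs % 7 : Nat) : Int) then 1 else 0)) ≠ 0 →
            0 ≤ p.2 ∧ p.2.toNat < (List.replicate L.toNat (0:Int)).length := by
          intro p hp hf
          simp only [List.length_replicate]
          fin_cases hp <;> split_ifs at hf <;> exact ⟨by norm_num, by omega⟩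
        apply List.ext_getElem
        · rw [length_foldl_setAdd, length_foldl_cond]
        · intro i h1 h2
          rw [← List.getD_eq_getElem _ 0, getD_foldl_setAdd a _ _ i hh]
          rw [← List.getD_eq_getElem _ 0,
            getD_foldl_cond a (fun p => ((t.natAbs / 7 : Nat) : Int) + (if p.1 < ((t.natAbs % 7 : Nat) : Int) then 1 else 0)) _ _ i hb]
          have hiL : i < L.toNat := by
            have := h1
            rw [length_foldl_setAdd] at this
            simpa using this
          have hrep : (List.replicate L.toNat (0:Int)).getD i 0 = 0 := by
            simp [List.getD_eq_getElem?_getD, hiL]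
          rw [hrep, zero_add, zero_add]
          by_cases hi : i < 7
          · rw [count_hits t.natAbs _ i ((2*i+2+t.natAbs) % 7) (Nat.mod_lt _ (by norm_num))
              (by intro k hk; omega)]
            interval_cases i <;>
              · simp only [PySem.List.enumerate_cons, PySem.List.enumerate_nil, List.map_cons,
                  List.map_nil, List.sum_cons, List.sum_nil]
                norm_num
                congr 1
                push_cast
                simp only [Int.abs_eq_natAbs]
                split_ifs <;> omega
          · have hc0 : ((List.range t.natAbs).map (fun (k : Nat) => (((2:Int) + 3*(t.natAbs:Int)) % 7 + 4*((k:Int)+1)) % 7)).count (i : Int) = 0 := by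
              rw [List.count_eq_zero]
              intro hmem
              simp only [List.mem_map, List.mem_range] at hmem
              obtain ⟨k, _, hk⟩ := hmem
              omega
            rw [hc0]
            have h3 : ¬((2:Int) = (i : Int)) := by omega
            have h4 : ¬((5:Int) = (i : Int)) := by omega
            have h5 : ¬((1:Int) = (i : Int)) := by omega
            have h6 : ¬((4:Int) = (i : Int)) := by omega
            have h7 : ¬((0:Int) = (i : Int)) := by omega
            have h8 : ¬((3:Int) = (i : Int)) := by omega
            have h9 : ¬((6:Int) = (i : Int)) := by omega
            simp only [PySem.List.enumerate_cons, PySem.List.enumerate_nil, List.map_cons,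
              List.map_nil, List.sum_cons, List.sum_nil,
              if_neg h3, if_neg h4, if_neg h5, if_neg h6, if_neg h7, if_neg h8, if_neg h9]
            simp
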